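-- pv_equiv track=rewrite | github.com/AtlasICL/leetcoding | python/2197bis.py | parse
-- ===== SOURCE A (Python) =====
-- from math import gcd, lcm
--
-- def parse(l):
--     if len(l) < 2:
--         return l
--     p = 0
--     q = 1
--     while q < len(l):
--         if gcd(l[p], l[q]) == 1:
--             p += 1
--             q += 1
--         elif len(l) > 1:
--             tmp = lcm(l[p], l[q])
--             l.pop(q)
--             l.pop(p)
--             l.insert(p, tmp)
--             p = 0
--             q = 1
--     return l
-- ===== SOURCE B (Python) =====
-- from math import gcd, lcm
--
-- def parse(l):
--     st = []
--     for x in l: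
--         while st and gcd(st[-1], x) != 1:
--             x = lcm(st.pop(), x)
--         st.append(x)
--     return st
-- ===== Notes on version B (the rewrite author's own statement) =====
-- stated objective: faster
-- what changed: Replaces A's restart-from-the-beginning scan (after every merge p,q reset to 0,1 and the whole prefix is rescanned, with quadratic pop/insert list surgery) by a single left-to-right pass over a stack, merging the stack top into the incoming element while their gcd exceeds 1.
import Mathlib
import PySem

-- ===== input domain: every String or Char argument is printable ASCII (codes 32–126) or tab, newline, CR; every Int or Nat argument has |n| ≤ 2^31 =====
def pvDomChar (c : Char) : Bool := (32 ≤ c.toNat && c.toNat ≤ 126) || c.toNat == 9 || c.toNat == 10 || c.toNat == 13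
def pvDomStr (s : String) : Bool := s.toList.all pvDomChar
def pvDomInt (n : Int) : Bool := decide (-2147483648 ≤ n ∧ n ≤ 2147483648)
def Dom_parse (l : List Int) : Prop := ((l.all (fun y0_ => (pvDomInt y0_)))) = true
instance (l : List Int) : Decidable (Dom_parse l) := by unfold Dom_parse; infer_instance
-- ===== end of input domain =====

-- B replaces A's restart-from-scratch quadratic merge scan by a single left-to-right stack pass
-- (merge the top while gcd > 1): same return value; note A mutates its argument in place and B
-- does not — the equivalence proved here is about the RETURN value only.

-- ===== PORT A =====
-- A's while-loop over (p, q) with q = p + 1 throughout; indices are always in range when the loop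
-- body runs (0 ≤ p < q < len l), so List.getD is exact for Python's l[p], l[q]; l.pop(q); l.pop(p);
-- l.insert(p, tmp) is eraseIdx q, eraseIdx p, insertIdx p.  The two `else l` fallbacks correspond to
-- states Python can never reach (q ≥ 1 always): the `elif len(l) > 1` guard and pop(p) cannot fail.
def loopA (l : List Int) (p q : Nat) : List Int :=
  if hq : q < l.length then
    if Int.gcd (l.getD p 0) (l.getD q 0) = 1 then loopA l (p + 1) (q + 1)
    else if 1 < l.length then
      -- tmp = lcm(l[p], l[q]); l.pop(q); l.pop(p); l.insert(p, tmp)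
      if hp : p < (l.eraseIdx q).length then
        loopA (((l.eraseIdx q).eraseIdx p).insertIdx p ((Int.lcm (l.getD p 0) (l.getD q 0) : Nat) : Int)) 0 1
      else l   -- unreachable: p + 1 = q < len l, Python's pop(p) never raises
    else l     -- unreachable: q ≥ 1 < len l here; Python would loop forever, but never reaches this
  else l
termination_by (l.length, l.length - q)
decreasing_by
  · exact Prod.Lex.right _ (by omega)
  · apply Prod.Lex.left
    have h1 : (l.eraseIdx q).length = l.length - 1 := List.length_eraseIdx_of_lt hq
    have h2 : ((l.eraseIdx q).eraseIdx p).length = (l.eraseIdx q).length - 1 :=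
      List.length_eraseIdx_of_lt hp
    rw [List.length_insertIdx_of_le_length (by omega) _]
    omega

def parse (l : List Int) : List Int :=
  if l.length < 2 then l else loopA l 0 1

-- ===== PORT B =====
-- Python's stack keeps its top at the END of `st`; the Lean stack keeps the top at the HEAD and
-- the result is reversed once at the end — the same values in the same merge order.
def pushB (st : List Int) (x : Int) : List Int :=
  match st with
  | [] => [x]
  | t :: ts => if Int.gcd t x = 1 then x :: t :: ts else pushB ts ((Int.lcm t x : Nat) : Int)

def parse_alt (l : List Int) : List Int :=
  (l.foldl pushB []).reverse

-- ===== PRECONDITION & SPEC =====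
def Spec_parse (l : List Int) (out : List Int) : Prop := out = parse_alt l
instance (l : List Int) (out : List Int) : Decidable (Spec_parse l out) := by unfold Spec_parse; infer_instance

-- ===== CLAIM (what is proved, stated in full; the proofs are below) =====
def Claim_equal_parse : Prop := ∀ (l : List Int), Dom_parse l → Spec_parse l (parse l)

-- ===== LEMMAS AND PROOFS =====

-- the final list of A: every adjacent pair is coprime
def AdjCop (l : List Int) : Prop :=
  ∀ i : Nat, i + 1 < l.length → Int.gcd (l.getD i 0) (l.getD (i + 1) 0) = 1

theorem gcd_ne_one_of_dvd_left {a a' b : Int} (hd : a ∣ a') (h : Int.gcd a b ≠ 1) :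
    Int.gcd a' b ≠ 1 := by
  intro h1
  exact h (Nat.eq_one_of_dvd_one (h1 ▸ Int.gcd_dvd_gcd_of_dvd_left b hd))

theorem gcd_ne_one_of_dvd_right {t a a' : Int} (hd : a ∣ a') (h : Int.gcd t a ≠ 1) :
    Int.gcd t a' ≠ 1 := by
  intro h1
  exact h (Nat.eq_one_of_dvd_one (h1 ▸ Int.gcd_dvd_gcd_of_dvd_right t hd))

theorem lcm_cast_assoc (t a b : Int) :
    ((Int.lcm ((Int.lcm t a : Nat) : Int) b : Nat) : Int)
      = ((Int.lcm t ((Int.lcm a b : Nat) : Int) : Nat) : Int) := by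
  simp [Int.lcm, Nat.lcm_assoc]

-- pushing a then b (non-coprime) is pushing lcm a b
theorem pushB_pushB (s : List Int) : ∀ a b : Int, Int.gcd a b ≠ 1 →
    pushB (pushB s a) b = pushB s ((Int.lcm a b : Nat) : Int) := by
  induction s with
  | nil =>
    intro a b hab
    simp [pushB, hab]
  | cons t ts ih =>
    intro a b hab
    by_cases hta : Int.gcd t a = 1
    · simp only [pushB, if_pos hta, if_neg hab]
    · have h1 : Int.gcd ((Int.lcm t a : Nat) : Int) b ≠ 1 :=
        gcd_ne_one_of_dvd_left (Int.dvd_lcm_right t a) hab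
      have h2 : Int.gcd t ((Int.lcm a b : Nat) : Int) ≠ 1 :=
        gcd_ne_one_of_dvd_right (Int.dvd_lcm_left a b) hta
      simp only [pushB, if_neg hta, if_neg h2]
      rw [ih _ b h1, lcm_cast_assoc]

-- the stack fold is invariant under merging one adjacent non-coprime pair
theorem foldl_merge (xs ys : List Int) (a b : Int) (s : List Int) (hab : Int.gcd a b ≠ 1) :
    List.foldl pushB s (xs ++ a :: b :: ys)
      = List.foldl pushB s (xs ++ ((Int.lcm a b : Nat) : Int) :: ys) := by
  simp only [List.foldl_append, List.foldl_cons]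
  rw [pushB_pushB _ a b hab]

-- decompose l around positions p, p+1
theorem split_two : ∀ (p : Nat) (l : List Int), p + 1 < l.length →
    l = l.take p ++ l.getD p 0 :: l.getD (p + 1) 0 :: l.drop (p + 2) := by
  intro p
  induction p with
  | zero =>
    intro l h
    match l, h with
    | x :: y :: rest, _ => simp
  | succ p ih =>
    intro l h
    match l, h with
    | x :: xs, h =>
      have := ih xs (by simpa using h)
      simpa using this

-- Python's pop(q); pop(p); insert(p, t) with q = p + 1 replaces the pair by t
theorem surgery : ∀ (p : Nat) (l : List Int) (t : Int), p + 1 < l.length →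
    ((l.eraseIdx (p + 1)).eraseIdx p).insertIdx p t = l.take p ++ t :: l.drop (p + 2) := by
  intro p
  induction p with
  | zero =>
    intro l t h
    match l, h with
    | x :: y :: rest, _ => simp [List.eraseIdx, List.insertIdx]
  | succ p ih =>
    intro l t h
    match l, h with
    | x :: xs, h =>
      have := ih xs t (by simpa using h)
      simpa [List.eraseIdx, List.insertIdx] using this

theorem adjCop_tail {x : Int} {xs : List Int} (h : AdjCop (x :: xs)) : AdjCop xs := by
  intro i hi
  have := h (i + 1) (by simpa using Nat.succ_lt_succ hi)
  simpa using this

-- the stack pass leaves an adjacent-coprime list unchanged (reversed onto the stack)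
theorem foldl_adjCop : ∀ (l s : List Int), AdjCop l →
    (∀ t ts x xs, s = t :: ts → l = x :: xs → Int.gcd t x = 1) →
    List.foldl pushB s l = l.reverse ++ s := by
  intro l
  induction l with
  | nil => intro s _ _; simp
  | cons x xs ih =>
    intro s hadj hhead
    have hpush : pushB s x = x :: s := by
      cases s with
      | nil => rfl
      | cons t ts => simp [pushB, hhead t ts x xs rfl rfl]
    have hxs : List.foldl pushB (x :: s) xs = xs.reverse ++ (x :: s) := by
      apply ih _ (adjCop_tail hadj)
      intro t ts y ys hs hl
      injection hs with h1 h2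
      subst h1
      have h0 := hadj 0 (by simp [hl])
      simpa [hl] using h0
    rw [List.foldl_cons, hpush, hxs]
    simp

-- main loop invariant: the stack fold is preserved and the result is adjacent-coprime
theorem loopA_main (l : List Int) (p q : Nat) :
    p + 1 = q → (∀ i : Nat, i < p → Int.gcd (l.getD i 0) (l.getD (i + 1) 0) = 1) →
    List.foldl pushB [] (loopA l p q) = List.foldl pushB [] l ∧ AdjCop (loopA l p q) := by
  induction l, p, q using loopA.induct with
  | case1 l p q hq hab ih =>
    intro hpq hinv
    rw [loopA]
    simp only [dif_pos hq, if_pos hab]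
    apply ih
    · omega
    · intro i hi
      rcases Nat.lt_or_ge i p with h | h
      · exact hinv i h
      · have : i = p := by omega
        subst this
        rw [← hpq] at hab
        exact hab
  | case2 l p q hq hab hlen hp ih =>
    intro hpq hinv
    subst hpq
    rw [loopA]
    simp only [dif_pos hq, if_neg hab, if_pos hlen, dif_pos hp]
    obtain ⟨ih1, ih2⟩ := ih rfl (by intro i hi; omega)
    refine ⟨ih1.trans ?_, ih2⟩
    have hq2 : p + 1 < l.length := hq
    rw [surgery p l _ hq2]
    conv_rhs => rw [split_two p l hq2]
    exact (foldl_merge (l.take p) (l.drop (p + 2)) (l.getD p 0) (l.getD (p + 1) 0) [] hab).symm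
  | case3 l p q hq hab hlen hp =>
    intro hpq hinv
    exfalso
    have h1 : (l.eraseIdx q).length = l.length - 1 := List.length_eraseIdx_of_lt hq
    rw [h1] at hp
    omega
  | case4 l p q hq hab hlen =>
    intro hpq hinv
    exfalso
    omega
  | case5 l p q hq =>
    intro hpq hinv
    rw [loopA]
    simp only [dif_neg hq]
    refine ⟨trivial, ?_⟩
    intro i hi
    exact hinv i (by omega)

theorem parse_alt_of_adjCop (l : List Int) (h : AdjCop l) : parse_alt l = l := by
  unfold parse_alt
  rw [foldl_adjCop l [] h (by intro t ts x xs hs _; cases hs)]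
  simp

-- ===== VERDICT (by name: the statement is the Claim_ definition above) =====
theorem parse_spec : Claim_equal_parse := by
  intro l _
  show parse l = parse_alt l
  unfold parse
  by_cases hlen : l.length < 2
  · rw [if_pos hlen]
    have hadj : AdjCop l := by intro i hi; omega
    exact (parse_alt_of_adjCop l hadj).symm
  · rw [if_neg hlen]
    obtain ⟨h1, h2⟩ := loopA_main l 0 1 rfl (by intro i hi; omega)
    have h3 : parse_alt (loopA l 0 1) = loopA l 0 1 := parse_alt_of_adjCop _ h2
    rw [← h3]
    unfold parse_alt
    rw [h1]
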